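-- pv_equiv track=rewrite | github.com/DavidNemeskey/emLam | emLam/conversions.py | field_lemma_deriv_kr
-- ===== SOURCE A (Python) =====
-- def field_lemma_deriv_kr(fields):
--     """ lemma_deriv k r"""
--     kr = fields[2]
--     parts = kr.rsplit('/')
--     to_add = []
--     if len(parts) > 1:
--         for p in range(len(parts[:-1]) - 1, -1, -1):
--             if '[COMPAR]' in parts[p]:
--                 to_add.append('<COMPAR>')
--                 del parts[p]
--             elif '[COMPAR_DESIGN]' in parts[p]:
--                 to_add.append('<COMPAR>')
--                 to_add.append('<DESIGN>')
--                 del parts[p]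
--             elif '[SUPERLAT]' in parts[p]:
--                 to_add.append('<SUPERLAT>')
--                 del parts[p]
--             elif '[SUPERLAT_DESIGN]' in parts[p]:
--                 to_add.append('<SUPERLAT>')
--                 to_add.append('<DESIGN>')
--                 del parts[p]
--             elif '[ORD]' in parts[p]:
--                 to_add.append('<ORD>')
--                 del parts[p]
--
--     if len(parts) > 1:
--         ret = [fields[1] + '_' + '/'.join(parts[:-1])]
--     else:
--         ret = [fields[1]]
--
--     for false_deriv in to_add:
--         ret.append(false_deriv)
--
--     last_index = parts[-1].find('<')
--     if last_index > 0:
--         while True: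
--             index = parts[-1].find('><', last_index)
--             if index > 0:
--                 ret.append(parts[-1][last_index:index + 1])
--                 last_index = index + 1
--             else:
--                 ret.append(parts[-1][last_index:])
--                 break
--     return ret
-- ===== SOURCE B (Python) =====
-- # Table-driven rewrite: one forward pass over parts[:-1] collecting kept segments and
-- # marker tag-groups (first table entry wins, as A's if/elif chain), then a single
-- # character scan that splits the final segment at exact '>''<' boundaries.
--
-- MARKERS = [
--     ('[COMPAR]', ['<COMPAR>']),
--     ('[COMPAR_DESIGN]', ['<COMPAR>', '<DESIGN>']),
--     ('[SUPERLAT]', ['<SUPERLAT>']),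
--     ('[SUPERLAT_DESIGN]', ['<SUPERLAT>', '<DESIGN>']),
--     ('[ORD]', ['<ORD>']),
-- ]
--
--
-- def field_lemma_deriv_kr(fields):
--     """ lemma_deriv k r"""
--     parts = fields[2].split('/')
--     kept, groups = [], []
--     for seg in parts[:-1]:
--         for marker, tags in MARKERS:
--             if marker in seg:
--                 groups.append(tags)
--                 break
--         else:
--             kept.append(seg)
--
--     if kept:
--         ret = [fields[1] + '_' + '/'.join(kept)]
--     else:
--         ret = [fields[1]]
--     ret += [t for g in reversed(groups) for t in g]
--
--     last = parts[-1]
--     i = last.find('<')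
--     if i > 0:
--         rest = last[i:]
--         piece = rest[0]
--         for prev, ch in zip(rest, rest[1:]):
--             if prev == '>' and ch == '<':
--                 ret.append(piece)
--                 piece = ''
--             piece += ch
--         ret.append(piece)
--     return ret
-- ===== Notes on version B (the rewrite author's own statement) =====
-- stated objective: simpler
-- what changed: Replaces the backward index loop with in-place deletion by a marker-table-driven single forward pass building kept/groups lists (tags flattened from reversed groups), and replaces the find('><') while-loop over absolute indices by one character scan over adjacent pairs that splits the final segment at exact '>''<' boundaries.
import Mathlib
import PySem

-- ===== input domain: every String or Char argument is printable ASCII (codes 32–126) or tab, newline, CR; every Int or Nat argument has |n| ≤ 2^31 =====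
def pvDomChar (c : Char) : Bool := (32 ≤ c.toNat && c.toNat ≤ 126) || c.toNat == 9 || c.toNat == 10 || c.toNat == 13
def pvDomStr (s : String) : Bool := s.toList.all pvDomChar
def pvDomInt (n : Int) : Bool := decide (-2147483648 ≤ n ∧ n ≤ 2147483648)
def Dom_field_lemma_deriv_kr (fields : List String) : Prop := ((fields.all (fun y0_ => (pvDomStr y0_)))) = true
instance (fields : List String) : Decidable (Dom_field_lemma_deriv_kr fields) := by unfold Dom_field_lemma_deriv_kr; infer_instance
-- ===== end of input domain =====

-- B rewrites A's two loops: a marker-table forward pass replaces the backward in-place-deletion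
-- loop, and a single adjacent-pair character scan replaces the find('><') while-loop (objective: simpler).

-- ===== PORT A =====

-- del parts[p]  (p is always in range inside A's loop; the getD guard only makes it total)
def krDel (parts : List String) (p : Int) : List String :=
  ((PySem.List.pop? parts p).map Prod.snd).getD parts

-- one iteration of A's backward marker loop at index p, branches in A's if/elif order
def krBodyA (st : List String × List String) (p : Int) : List String × List String :=
  match PySem.List.pyGet? st.1 p with   -- parts[p] (always in range inside A's loop)
  | none => st
  | some s =>
    if PySem.Str.isIn "[COMPAR]" s then (krDel st.1 p, st.2 ++ ["<COMPAR>"])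
    else if PySem.Str.isIn "[COMPAR_DESIGN]" s then (krDel st.1 p, st.2 ++ ["<COMPAR>", "<DESIGN>"])
    else if PySem.Str.isIn "[SUPERLAT]" s then (krDel st.1 p, st.2 ++ ["<SUPERLAT>"])
    else if PySem.Str.isIn "[SUPERLAT_DESIGN]" s then (krDel st.1 p, st.2 ++ ["<SUPERLAT>", "<DESIGN>"])
    else if PySem.Str.isIn "[ORD]" s then (krDel st.1 p, st.2 ++ ["<ORD>"])
    else st

-- s.find(sub, start) with a start beyond len(s) is -1 (needed for termination of krTailA)
theorem krFindFrom_of_len_lt (s sub : List Char) (k : Nat) (h : s.length < k) :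
    PySem.Chars.findFrom s sub (k : Int) none = -1 := by
  simp [PySem.Chars.findFrom, show ¬((k : Int) < 0) from by omega,
    show (s.length : Int) < (k : Int) from by exact_mod_cast h]

-- A's while-True loop over parts[-1]; parts[-1].find('><', last_index) is PySem.Chars.findFrom
def krTailA (s : List Char) (last_index : Nat) (ret : List String) : List String :=
  let index := PySem.Chars.findFrom s ['>', '<'] (last_index : Int)
  if h : 0 < index then
    krTailA s (index.toNat + 1)
      (ret ++ [String.ofList (PySem.Chars.slice s (some (last_index : Int)) (some (index + 1)))])
  else
    ret ++ [String.ofList (PySem.Chars.slice s (some (last_index : Int)) none)]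
termination_by s.length - last_index
decreasing_by
  simp only [index] at h ⊢
  by_cases hk : last_index ≤ s.length
  · rw [PySem.Chars.findFrom_natCast s ['>', '<'] last_index hk] at h ⊢
    by_cases hne : PySem.Chars.find (s.drop last_index) ['>', '<'] = -1
    · rw [if_pos hne] at h; exact absurd h (by norm_num)
    · rw [if_neg hne] at h ⊢
      have hj0 : (0:Int) ≤ PySem.Chars.find (s.drop last_index) ['>', '<'] := by
        have := PySem.Chars.neg_one_le_find (s.drop last_index) ['>', '<']
        omega
      obtain ⟨hpre, _⟩ := PySem.Chars.find_spec hj0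
      have hlen := hpre.length_le
      simp only [List.length_drop, List.length_cons, List.length_nil] at hlen
      have hle := PySem.Chars.find_le_length (s.drop last_index) ['>', '<']
      simp only [List.length_drop] at hle
      omega
  · rw [krFindFrom_of_len_lt s ['>', '<'] last_index (by omega)] at h
    exact absurd h (by norm_num)

def field_lemma_deriv_kr (fields : List String) : List String :=
  let kr := (PySem.List.pyGet? fields 2).getD ""      -- fields[2]; Pre_ gives 3 ≤ fields.length
  let parts := (PySem.Str.split? kr "/").getD []      -- kr.rsplit('/') = kr.split('/') (no maxsplit); sep "/" ≠ "" so never none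
  let st :=
    if 1 < (parts.length : Int) then
      (PySem.List.pyRange (((PySem.List.slice parts none (some (-1))).length : Int) - 1) (-1) (-1)).foldl
        krBodyA (parts, ([] : List String))
    else (parts, [])
  let ret :=
    if 1 < (st.1.length : Int) then
      [((PySem.List.pyGet? fields 1).getD "") ++ "_" ++
        PySem.Str.join "/" (PySem.List.slice st.1 none (some (-1)))]
    else [(PySem.List.pyGet? fields 1).getD ""]
  let ret := st.2.foldl (fun acc x => acc ++ [x]) ret
  let last := (PySem.List.pyGet? st.1 (-1)).getD ""
  let last_index := PySem.Str.find last "<"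
  if 0 < last_index then krTailA last.toList last_index.toNat ret else ret

-- ===== PORT B =====

-- B's marker → tags table (first match wins)
def krMarkers : List (String × List String) :=
  [("[COMPAR]", ["<COMPAR>"]),
   ("[COMPAR_DESIGN]", ["<COMPAR>", "<DESIGN>"]),
   ("[SUPERLAT]", ["<SUPERLAT>"]),
   ("[SUPERLAT_DESIGN]", ["<SUPERLAT>", "<DESIGN>"]),
   ("[ORD]", ["<ORD>"])]

-- one forward step of B's kept/groups pass (inner for/break/else = find?)
def krStepB (st : List String × List (List String)) (seg : String) :
    List String × List (List String) :=
  match krMarkers.find? (fun mt => PySem.Str.isIn mt.1 seg) with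
  | some mt => (st.1, st.2 ++ [mt.2])
  | none => (st.1 ++ [seg], st.2)

-- B's character scan over adjacent pairs (prev, ch): flush the piece at each '>''<' boundary
def krScanB (st : List Char × List String) (pr : Char × Char) : List Char × List String :=
  if pr.1 = '>' ∧ pr.2 = '<' then ([pr.2], st.2 ++ [String.ofList st.1])
  else (st.1 ++ [pr.2], st.2)

def field_lemma_deriv_kr_alt (fields : List String) : List String :=
  let parts := (PySem.Str.split? ((PySem.List.pyGet? fields 2).getD "") "/").getD []  -- fields[2].split('/'); sep ≠ ""
  let kg := (PySem.List.slice parts none (some (-1))).foldl krStepB ([], [])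
  let ret :=
    if !kg.1.isEmpty then
      [((PySem.List.pyGet? fields 1).getD "") ++ "_" ++ PySem.Str.join "/" kg.1]
    else [(PySem.List.pyGet? fields 1).getD ""]
  let ret := ret ++ kg.2.reverse.flatten
  let last := (PySem.List.pyGet? parts (-1)).getD ""
  let i := PySem.Str.find last "<"
  if 0 < i then
    match last.toList.drop i.toNat with   -- rest = last[i:]; nonempty since i points at a '<'
    | [] => ret
    | c :: cs =>
      let pr := (List.zip (c :: cs) cs).foldl krScanB ([c], ret)
      pr.2 ++ [String.ofList pr.1]
  else ret

-- ===== PRECONDITION & SPEC =====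
-- A reads fields[2] and fields[1]: on shorter lists it raises IndexError, so those are excluded.
def Pre_field_lemma_deriv_kr (fields : List String) : Prop := 3 ≤ fields.length
instance (fields : List String) : Decidable (Pre_field_lemma_deriv_kr fields) := by
  unfold Pre_field_lemma_deriv_kr; infer_instance
def pvWitness_field_lemma_deriv_kr : List String := ["f0", "lem", "a[ORD]/x<CAS><ACC>"]
def Spec_field_lemma_deriv_kr (fields : List String) (out : List String) : Prop :=
  out = field_lemma_deriv_kr_alt fields
instance (fields : List String) (out : List String) : Decidable (Spec_field_lemma_deriv_kr fields out) := by
  unfold Spec_field_lemma_deriv_kr; infer_instance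

-- ===== CLAIM (what is proved, stated in full; the proofs are below) =====
def Claim_equal_field_lemma_deriv_kr : Prop :=
  ∀ (fields : List String), Dom_field_lemma_deriv_kr fields → Pre_field_lemma_deriv_kr fields →
    Spec_field_lemma_deriv_kr fields (field_lemma_deriv_kr fields)

-- ===== LEMMAS AND PROOFS =====

-- first matching table entry for a segment (none = kept)
def krMOf (s : String) : Option (String × List String) :=
  krMarkers.find? (fun mt => PySem.Str.isIn mt.1 s)

def krKeptOf (l : List String) : List String := l.filter (fun s => (krMOf s).isNone)
def krGroupsOf (l : List String) : List (List String) := l.filterMap (fun s => (krMOf s).map (·.2))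
def krToAddOf (l : List String) : List String := (krGroupsOf l).reverse.flatten

-- canonical split of the final segment at exact '>''<' boundaries
def krPieces (u : List Char) : List (List Char) :=
  let j := PySem.Chars.find u ['>', '<']
  if h : 0 ≤ j then
    u.take (j.toNat + 1) :: krPieces (u.drop (j.toNat + 1))
  else [u]
termination_by u.length
decreasing_by
  obtain ⟨hpre, _⟩ := PySem.Chars.find_spec h
  have hlen := hpre.length_le
  simp only [List.length_drop, List.length_cons, List.length_nil] at hlen
  have hle := PySem.Chars.find_le_length u ['>', '<']
  simp only [List.length_drop] at *
  omega

theorem krBodyA_at (l' : List String) (y : String) (t acc : List String) :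
    krBodyA (l' ++ y :: t, acc) ((l'.length : Int)) =
      (match krMOf y with
       | some mt => (l' ++ t, acc ++ mt.2)
       | none => (l' ++ y :: t, acc)) := by
  have hget : PySem.List.pyGet? (l' ++ y :: t) ((l'.length : Int)) = some y := by
    rw [PySem.List.pyGet?_natCast]; simp
  have hdel : krDel (l' ++ y :: t) ((l'.length : Int)) = l' ++ t := by
    simp only [krDel, PySem.List.pop?, PySem.List.pyIdx?]
    rw [if_pos (by positivity), if_pos (by simp)]
    simp [List.eraseIdx_append_of_length_le (le_refl l'.length)]
  simp only [krBodyA, hget, hdel, krMOf, krMarkers, List.find?]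
  split_ifs with h1 h2 h3 h4 h5 <;> simp_all [PySem.Str.isIn_eq]

theorem krPyRangeDescNil : PySem.List.pyRange (-1) (-1) (-1) = [] := by decide

theorem krPyRangeDescCons (n : Nat) :
    PySem.List.pyRange (((n + 1 : Nat) : Int) - 1) (-1) (-1) =
      (n : Int) :: PySem.List.pyRange ((n : Int) - 1) (-1) (-1) := by
  cases n with
  | zero => decide
  | succ m =>
    simp only [PySem.List.pyRange]
    norm_num
    rw [show ((m:Int)+1+1).toNat = m+2 from by omega, if_pos (show (-1:Int) < (m:Int) by omega)]
    rw [List.range_succ_eq_map, List.map_cons, List.map_map]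
    congr 1
    norm_num

theorem krLoopA (l t acc : List String) :
    (PySem.List.pyRange ((l.length : Int) - 1) (-1) (-1)).foldl krBodyA (l ++ t, acc) =
      (krKeptOf l ++ t, acc ++ krToAddOf l) := by
  induction l using List.reverseRecOn generalizing t acc with
  | nil =>
    simp only [List.length_nil, Nat.cast_zero, zero_sub, krPyRangeDescNil, List.foldl_nil]
    simp [krKeptOf, krToAddOf, krGroupsOf]
  | append_singleton l' y ih =>
    rw [List.length_append, List.length_singleton, Nat.cast_add, Nat.cast_one,
      show ((l'.length : Int) + 1 - 1) = (((l'.length + 1 : Nat) : Int) - 1) from by push_cast; ring]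
    rw [krPyRangeDescCons, List.foldl_cons, List.append_assoc, List.singleton_append]
    rw [krBodyA_at]
    cases hm : krMOf y with
    | some mt =>
      rw [ih]
      simp [krKeptOf, krToAddOf, krGroupsOf, List.filter_append, List.filterMap_append, hm]
    | none =>
      rw [ih]
      simp [krKeptOf, krToAddOf, krGroupsOf, List.filter_append, List.filterMap_append, hm]

theorem krStepB_spec (l : List String) (k : List String) (g : List (List String)) :
    l.foldl krStepB (k, g) = (k ++ krKeptOf l, g ++ krGroupsOf l) := by
  induction l generalizing k g with
  | nil => simp [krKeptOf, krGroupsOf]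
  | cons s rest ih =>
    rw [List.foldl_cons]
    show List.foldl krStepB (krStepB (k, g) s) rest = _
    rw [show krStepB (k, g) s =
        (match krMOf s with
         | some mt => (k, g ++ [mt.2])
         | none => (k ++ [s], g)) from by simp [krStepB, krMOf]]
    cases hm : krMOf s with
    | some mt => rw [ih]; simp [krKeptOf, krGroupsOf, hm]
    | none => rw [ih]; simp [krKeptOf, krGroupsOf, hm]

-- no '>''<' boundary anywhere in u
def krNB (u : List Char) : Prop := ¬ ['>', '<'] <:+: u

theorem krScan_noflush (rest : List Char) (prev : Char) (piece : List Char) (ret : List String)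
    (h : krNB (prev :: rest)) :
    (List.zip (prev :: rest) rest).foldl krScanB (piece, ret) = (piece ++ rest, ret) := by
  induction rest generalizing prev piece ret with
  | nil => simp
  | cons x rs ih =>
    have hnb : ¬ (prev = '>' ∧ x = '<') := by
      rintro ⟨rfl, rfl⟩
      exact h (List.IsPrefix.isInfix ⟨rs, rfl⟩)
    have htl : krNB (x :: rs) := fun hi => h (hi.trans (List.suffix_cons prev (x :: rs)).isInfix)
    rw [List.zip_cons_cons, List.foldl_cons]
    show (List.zip (x :: rs) rs).foldl krScanB (krScanB (piece, ret) (prev, x)) = _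
    rw [show krScanB (piece, ret) (prev, x) = (piece ++ [x], ret) from by simp [krScanB, hnb]]
    rw [ih x (piece ++ [x]) ret htl]
    simp

theorem krScan_toBoundary (a : List Char) (prev : Char) (piece : List Char) (ret : List String)
    (w : List Char) (h : krNB (prev :: a ++ ['>'])) :
    (List.zip ((prev :: a ++ ['>']) ++ '<' :: w) ((a ++ ['>']) ++ '<' :: w)).foldl krScanB (piece, ret) =
      (List.zip ('<' :: w) w).foldl krScanB (['<'], ret ++ [String.ofList (piece ++ a ++ ['>'])]) := by
  induction a generalizing prev piece ret with
  | nil =>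
    simp only [List.nil_append, List.cons_append, List.zip_cons_cons, List.foldl_cons]
    rw [show krScanB (piece, ret) (prev, '>') = (piece ++ ['>'], ret) from by
      simp [krScanB]]
    rw [show krScanB (piece ++ ['>'], ret) ('>', '<') =
        (['<'], ret ++ [String.ofList (piece ++ ['>'])]) from by simp [krScanB]]
    simp
  | cons x a' ih =>
    have hnb : ¬ (prev = '>' ∧ x = '<') := by
      rintro ⟨rfl, rfl⟩
      exact h (List.IsPrefix.isInfix ⟨a' ++ ['>'], by simp⟩)
    have htl : krNB (x :: a' ++ ['>']) := fun hi => by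
      exact h (hi.trans (List.suffix_cons prev (x :: a' ++ ['>'])).isInfix)
    simp only [List.cons_append, List.zip_cons_cons, List.foldl_cons]
    rw [show krScanB (piece, ret) (prev, x) = (piece ++ [x], ret) from by simp [krScanB, hnb]]
    have := ih x (piece ++ [x]) ret htl
    simp only [List.cons_append] at this ⊢
    rw [this]
    simp

theorem krScan_eq (u : List Char) (c : Char) (cs : List Char) (ret : List String)
    (hu : u = c :: cs) :
    (let pr := (List.zip (c :: cs) cs).foldl krScanB ([c], ret)
     pr.2 ++ [String.ofList pr.1]) = ret ++ (krPieces u).map String.ofList := by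
  induction hlen : u.length using Nat.strong_induction_on generalizing u c cs ret with
  | _ n ih =>
  subst hu
  by_cases hne : PySem.Chars.find (c :: cs) ['>', '<'] = -1
  · have hnb : krNB (c :: cs) := (PySem.Chars.find_eq_neg_one_iff _ _).mp hne
    rw [krPieces, dif_neg (by rw [hne]; norm_num)]
    rw [krScan_noflush cs c [c] ret hnb]
    simp
  · have hj0 : (0:Int) ≤ PySem.Chars.find (c :: cs) ['>', '<'] := by
      have := PySem.Chars.neg_one_le_find (c :: cs) ['>', '<']
      omega
    obtain ⟨hpre, hmin⟩ := PySem.Chars.find_spec hj0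
    rw [krPieces, dif_pos hj0]
    generalize hJ : (PySem.Chars.find (c :: cs) ['>', '<']).toNat = J at hpre hmin ⊢
    obtain ⟨t, ht⟩ := hpre
    have hJlen : J + 2 ≤ (c :: cs).length := by
      have := congrArg List.length ht
      simp only [List.length_append, List.length_drop, List.length_cons, List.length_nil] at this
      simp only [List.length_cons]
      omega
    have hdropJ : (c :: cs).drop J = '>' :: '<' :: t := by
      rw [← ht]; rfl
    have hdropJ1 : (c :: cs).drop (J + 1) = '<' :: t := by
      have h := congrArg (List.drop 1) hdropJ
      rw [List.drop_drop] at h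
      simpa using h
    have hJcs : J + 1 ≤ cs.length := by
      simp only [List.length_cons] at hJlen
      omega
    rcases Nat.eq_zero_or_pos J with hJ0 | hJpos
    · subst hJ0
      simp only [List.drop_zero] at hdropJ
      cases hdropJ
      simp only [List.zip_cons_cons, List.foldl_cons]
      rw [show krScanB (['>'], ret) ('>', '<') = (['<'], ret ++ [String.ofList ['>']]) from by
        simp [krScanB]]
      rw [ih ('<' :: t).length (by simp only [List.length_cons] at hlen ⊢; omega)
        ('<' :: t) '<' t (ret ++ [String.ofList ['>']]) rfl rfl]
      simp [hdropJ1]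
    · -- J ≥ 1 : consume the boundary-free prefix with krScan_toBoundary
      have hu_split : (c :: cs) = (c :: cs).take J ++ '>' :: '<' :: t := by
        have h := List.take_append_drop J (c :: cs)
        rw [hdropJ] at h
        exact h.symm
      have hlen_take : ((c :: cs).take J).length = J := by
        simp only [List.length_take, List.length_cons]
        omega
      have htakeJ : (c :: cs).take J = c :: cs.take (J - 1) := by
        cases J with
        | zero => omega
        | succ m => simp [List.take_succ_cons]
      have htake : (c :: cs).take (J + 1) = c :: cs.take (J - 1) ++ ['>'] := by
        conv_lhs => rw [hu_split]
        rw [List.take_append, List.take_of_length_le (by rw [hlen_take]; omega), hlen_take,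
          Nat.add_sub_cancel_left, htakeJ]
        rfl
      have hlA : (cs.take (J - 1)).length = J - 1 := by
        simp only [List.length_take]
        omega
      have hcs : cs = (cs.take (J - 1) ++ ['>']) ++ '<' :: t := by
        have h3 : (c :: cs) = (c :: cs).take (J + 1) ++ '<' :: t := by
          have h := List.take_append_drop (J + 1) (c :: cs)
          rw [hdropJ1] at h
          exact h.symm
        rw [htake] at h3
        simpa using congrArg List.tail h3
      have hnb : krNB (c :: cs.take (J - 1) ++ ['>']) := by
        intro hi
        rw [← (PySem.Chars.isIn_iff_infix _ _),
          ← PySem.Chars.exists_prefix_drop_iff_isIn] at hi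
        obtain ⟨i, hpre2⟩ := hi
        have hl : (c :: cs.take (J - 1) ++ ['>']).length = J + 1 := by
          simp only [List.length_append, List.length_cons, List.length_nil, hlA]
          omega
        have hilen : i + 2 ≤ J + 1 := by
          have h := hpre2.length_le
          simp only [List.length_drop, hl, List.length_cons, List.length_nil] at h
          omega
        apply hmin i (by omega)
        refine hpre2.trans ?_
        rw [← htake, List.drop_take]
        exact List.take_prefix _ _
      have hzipeq : (c :: cs).zip cs =
          ((c :: cs.take (J - 1) ++ ['>']) ++ '<' :: t).zip ((cs.take (J - 1) ++ ['>']) ++ '<' :: t) := by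
        conv_lhs => rw [hcs]
        simp
      rw [hzipeq, krScan_toBoundary (cs.take (J - 1)) c [c] ret t hnb]
      rw [ih ('<' :: t).length
        (by
          have hcl := congrArg List.length hcs
          simp only [List.length_append, List.length_cons, List.length_nil, hlA] at hcl
          simp only [List.length_cons] at hlen ⊢
          omega)
        ('<' :: t) '<' t _ rfl rfl]
      rw [htake, hdropJ1]
      simp

theorem krTailA_eq (s : List Char) (k : Nat) (ret : List String) (hk1 : 1 ≤ k)
    (hk : k ≤ s.length) :
    krTailA s k ret = ret ++ (krPieces (s.drop k)).map String.ofList := by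
  induction hm : s.length - k using Nat.strong_induction_on generalizing k ret with
  | _ n ih =>
  rw [krTailA]
  simp only [PySem.Chars.findFrom_natCast s ['>', '<'] k hk]
  by_cases hne : PySem.Chars.find (s.drop k) ['>', '<'] = -1
  · rw [if_pos hne, dif_neg (by norm_num)]
    rw [krPieces, dif_neg (by rw [hne]; norm_num)]
    simp [PySem.Chars.slice_eq_listSlice, PySem.List.slice_from s (by positivity : (0:Int) ≤ (k:Int))]
  · have hj0 : (0:Int) ≤ PySem.Chars.find (s.drop k) ['>', '<'] := by
      have := PySem.Chars.neg_one_le_find (s.drop k) ['>', '<']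
      omega
    obtain ⟨hpre, _⟩ := PySem.Chars.find_spec hj0
    have hJlen : (PySem.Chars.find (s.drop k) ['>', '<']).toNat + 2 ≤ s.length - k := by
      have := hpre.length_le
      simp only [List.length_drop, List.length_cons, List.length_nil] at this
      omega
    rw [if_neg hne, dif_pos (by omega)]
    have h1 : ((k : Int) + PySem.Chars.find (s.drop k) ['>', '<']).toNat + 1 =
        k + ((PySem.Chars.find (s.drop k) ['>', '<']).toNat + 1) := by omega
    have h2 : (k : Int) + PySem.Chars.find (s.drop k) ['>', '<'] + 1 =
        ((k + ((PySem.Chars.find (s.drop k) ['>', '<']).toNat + 1) : Nat) : Int) := by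
      push_cast
      omega
    rw [h1, h2]
    rw [show PySem.Chars.slice s (some ((k : Int)))
          (some ((k + ((PySem.Chars.find (s.drop k) ['>', '<']).toNat + 1) : Nat) : Int)) =
        (s.drop k).take ((PySem.Chars.find (s.drop k) ['>', '<']).toNat + 1) from by
      rw [PySem.Chars.slice_eq_listSlice, PySem.List.slice_natCast]
      congr 1
      omega]
    conv_rhs => rw [krPieces, dif_pos hj0]
    rw [ih (s.length - (k + ((PySem.Chars.find (s.drop k) ['>', '<']).toNat + 1))) (by omega)
      (k + ((PySem.Chars.find (s.drop k) ['>', '<']).toNat + 1)) _ (by omega) (by omega) rfl]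
    rw [show s.drop (k + ((PySem.Chars.find (s.drop k) ['>', '<']).toNat + 1)) =
        (s.drop k).drop ((PySem.Chars.find (s.drop k) ['>', '<']).toNat + 1) from by
      rw [List.drop_drop]]
    simp

-- ===== VERDICT (by name: the statement is the Claim_ definition above) =====
theorem krGetLast (m : List String) (x : String) :
    PySem.List.pyGet? (m ++ [x]) (-1) = some x := by
  simp only [PySem.List.pyGet?, PySem.List.pyIdx?, List.length_append, List.length_cons,
    List.length_nil]
  rw [if_neg (by omega), if_pos (by push_cast; omega)]
  simp

-- the two ports agree on the tail-splitting phase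
theorem krTailPhase (x : String) (ret : List String) :
    (if 0 < PySem.Str.find x "<" then
      krTailA x.toList (PySem.Str.find x "<").toNat ret
    else ret) =
    (if 0 < PySem.Str.find x "<" then
      match x.toList.drop (PySem.Str.find x "<").toNat with
      | [] => ret
      | c :: cs =>
        let pr := (List.zip (c :: cs) cs).foldl krScanB ([c], ret)
        pr.2 ++ [String.ofList pr.1]
    else ret) := by
  by_cases hi : 0 < PySem.Str.find x "<"
  · rw [if_pos hi, if_pos hi]
    have hfe : PySem.Str.find x "<" = PySem.Chars.find x.toList ['<'] := by
      rw [PySem.Str.find_eq]; rfl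
    rw [hfe] at hi ⊢
    have hle := PySem.Chars.find_le_length x.toList ['<']
    obtain ⟨hpre, _⟩ := PySem.Chars.find_spec (le_of_lt hi)
    cases hdrop : x.toList.drop (PySem.Chars.find x.toList ['<']).toNat with
    | nil => rw [hdrop] at hpre; simp at hpre
    | cons c cs =>
      rw [krTailA_eq x.toList (PySem.Chars.find x.toList ['<']).toNat ret (by omega)
        (by omega), hdrop]
      exact (krScan_eq (c :: cs) c cs ret rfl).symm
  · rw [if_neg hi, if_neg hi]

theorem field_lemma_deriv_kr_spec : Claim_equal_field_lemma_deriv_kr := by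
  intro fields _ _
  unfold Spec_field_lemma_deriv_kr
  simp only [field_lemma_deriv_kr, field_lemma_deriv_kr_alt]
  generalize (PySem.Str.split? ((PySem.List.pyGet? fields 2).getD "") "/").getD [] = parts
  rcases List.eq_nil_or_concat parts with rfl | ⟨l, x, hcat⟩
  · norm_num [show (PySem.List.pyGet? ([] : List String) (-1)) = none from rfl,
      show PySem.Str.find "" "<" = (-1 : Int) from by decide,
      show PySem.Chars.find [] "<".toList = (-1 : Int) from by decide,
      PySem.List.slice_to_neg_one]
  · rw [List.concat_eq_append] at hcat
    subst hcat
    -- marker phase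
    have hslice : PySem.List.slice (l ++ [x]) none (some (-1)) = l := by
      rw [PySem.List.slice_to_neg_one, List.dropLast_concat]
    have hst : (if 1 < (((l ++ [x]).length : Nat) : Int) then
        (PySem.List.pyRange (((PySem.List.slice (l ++ [x]) none (some (-1))).length : Int) - 1)
          (-1) (-1)).foldl krBodyA (l ++ [x], ([] : List String))
      else (l ++ [x], [])) = (krKeptOf l ++ [x], krToAddOf l) := by
      rcases List.eq_nil_or_concat l with rfl | ⟨l', y, rfl⟩
      · norm_num [krKeptOf, krToAddOf, krGroupsOf]
      · rw [if_pos (by simp; omega), hslice]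
        exact krLoopA _ [x] []
    rw [hst, hslice, krStepB_spec]
    simp only [List.nil_append]
    -- head of ret
    have hhead : (if 1 < (((krKeptOf l ++ [x]).length : Nat) : Int) then
        [((PySem.List.pyGet? fields 1).getD "") ++ "_" ++
          PySem.Str.join "/" (PySem.List.slice (krKeptOf l ++ [x]) none (some (-1)))]
      else [(PySem.List.pyGet? fields 1).getD ""]) =
        (if !(krKeptOf l).isEmpty then
          [((PySem.List.pyGet? fields 1).getD "") ++ "_" ++ PySem.Str.join "/" (krKeptOf l)]
        else [(PySem.List.pyGet? fields 1).getD ""]) := by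
      rw [PySem.List.slice_to_neg_one, List.dropLast_concat]
      rcases List.eq_nil_or_concat (krKeptOf l) with hk | ⟨k', y, hk⟩ <;> rw [hk]
      · norm_num
      · rw [if_pos (by simp; omega), if_pos (by simp)]
    rw [hhead, PySem.List.foldl_append_singleton_eq_self, krGetLast, krGetLast]
    simp only [Option.getD_some]
    rw [show (krGroupsOf l).reverse.flatten = krToAddOf l from rfl]
    exact krTailPhase x _
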